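-- pv_equiv track=rewrite | github.com/simonrozsival/mff-transmembrane-hmm | src/translations.py | labels_to_states_simple_v2
-- ===== SOURCE A (Python) =====
-- def labels_to_states_simple_v2(labels):
--     converted_labels = []
--     last_i_or_o = 'i'
--     for l in labels:
--         if l == 'i':
--             last_i_or_o = 'i'
--             converted_labels.append('i')
--         elif l == 'o':
--             last_i_or_o = 'o'
--             converted_labels.append('o')
--         elif last_i_or_o == 'i':
--             converted_labels.append('M_io')
--         elif last_i_or_o == 'o':
--             converted_labels.append('M_oi')
--         else:
--             raise EnvironmentError("Some weird state.")  # just some error :D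
--
--     return converted_labels
-- ===== SOURCE B (Python) =====
-- def labels_to_states_simple_v2(labels):
--     labels = list(labels)
--     # forward-filled orientation BEFORE each element (length len(labels)+1, seeded with 'i')
--     orients = ['i']
--     for l in labels:
--         orients.append(l if l in ('i', 'o') else orients[-1])
--     return [l if l in ('i', 'o') else ('M_io' if o == 'i' else 'M_oi')
--             for l, o in zip(labels, orients)]
-- ===== Notes on version B (the rewrite author's own statement) =====
-- stated objective: alternative
-- what changed: Replaces the single stateful accumulator loop by two passes: a forward-filled orientation prefix stream (scan) followed by a stateless zip/map that emits each output from (label, preceding orientation).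
import Mathlib
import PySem

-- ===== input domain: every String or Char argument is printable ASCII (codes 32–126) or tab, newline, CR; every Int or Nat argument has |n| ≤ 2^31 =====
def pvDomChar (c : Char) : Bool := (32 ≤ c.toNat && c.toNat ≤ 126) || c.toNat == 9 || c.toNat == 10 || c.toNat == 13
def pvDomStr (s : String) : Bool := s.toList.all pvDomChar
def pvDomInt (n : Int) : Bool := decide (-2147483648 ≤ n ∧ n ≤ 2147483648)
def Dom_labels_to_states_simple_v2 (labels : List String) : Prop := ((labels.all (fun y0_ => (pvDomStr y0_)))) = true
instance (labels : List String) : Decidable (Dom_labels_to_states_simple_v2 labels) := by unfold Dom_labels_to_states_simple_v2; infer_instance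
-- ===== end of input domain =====

-- B replaces A's single stateful accumulator loop with two passes: a forward-filled
-- orientation prefix stream (scan) plus a stateless zip/map; alternative decomposition, same cost.


-- ===== PORT A =====
-- one fold over the labels carrying (converted_labels, last_i_or_o); the final
-- 'raise' branch is unreachable (last_i_or_o is always "i" or "o"), the port keeps
-- the state unchanged there.
def labels_to_states_simple_v2 (labels : List String) : List String :=
  (labels.foldl
    (fun (st : List String × String) l =>
      if l = "i" then (st.1 ++ ["i"], "i")
      else if l = "o" then (st.1 ++ ["o"], "o")
      else if st.2 = "i" then (st.1 ++ ["M_io"], st.2)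
      else if st.2 = "o" then (st.1 ++ ["M_oi"], st.2)
      else st)
    ([], "i")).1

-- ===== PORT B =====
-- forward-filled orientation before each element (scanl seeded with "i")
def pvOrients (labels : List String) : List String :=
  labels.scanl (fun prev l => if l = "i" ∨ l = "o" then l else prev) "i"

def labels_to_states_simple_v2_alt (labels : List String) : List String :=
  (labels.zip (pvOrients labels)).map
    (fun lo => if lo.1 = "i" ∨ lo.1 = "o" then lo.1
               else if lo.2 = "i" then "M_io" else "M_oi")

-- ===== PRECONDITION & SPEC =====
def Spec_labels_to_states_simple_v2 (labels : List String) (out : List String) : Prop := out = labels_to_states_simple_v2_alt labels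
instance (labels : List String) (out : List String) : Decidable (Spec_labels_to_states_simple_v2 labels out) := by unfold Spec_labels_to_states_simple_v2; infer_instance

-- ===== CLAIM (what is proved, stated in full; the proofs are below) =====
def Claim_equal_labels_to_states_simple_v2 : Prop := ∀ (labels : List String), Dom_labels_to_states_simple_v2 labels → Spec_labels_to_states_simple_v2 labels (labels_to_states_simple_v2 labels)

-- ===== LEMMAS AND PROOFS =====

-- A's fold from any reachable state (acc, o) with o ∈ {"i","o"} produces acc ++ B's
-- zip/map output computed with the scan seeded at o.
theorem pv_fold_eq (labels : List String) :
    ∀ (acc : List String) (o : String), (o = "i" ∨ o = "o") →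
    (labels.foldl
      (fun (st : List String × String) l =>
        if l = "i" then (st.1 ++ ["i"], "i")
        else if l = "o" then (st.1 ++ ["o"], "o")
        else if st.2 = "i" then (st.1 ++ ["M_io"], st.2)
        else if st.2 = "o" then (st.1 ++ ["M_oi"], st.2)
        else st)
      (acc, o)).1
    = acc ++ (labels.zip
        (labels.scanl (fun prev l => if l = "i" ∨ l = "o" then l else prev) o)).map
        (fun lo => if lo.1 = "i" ∨ lo.1 = "o" then lo.1
                   else if lo.2 = "i" then "M_io" else "M_oi") := by
  induction labels with
  | nil => intro acc o _; simp
  | cons l ls ih =>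
    intro acc o ho
    simp only [List.foldl_cons, List.scanl_cons, List.zip_cons_cons, List.map_cons]
    by_cases hi : l = "i"
    · subst hi
      rw [if_pos rfl, ih (acc ++ ["i"]) "i" (Or.inl rfl)]
      simp
    · by_cases hoo : l = "o"
      · subst hoo
        rw [if_neg hi, if_pos rfl, ih (acc ++ ["o"]) "o" (Or.inr rfl)]
        simp
      · have hno : ¬ (l = "i" ∨ l = "o") := by
          rintro (h | h) <;> [exact hi h; exact hoo h]
        rw [if_neg hi, if_neg hoo]
        rcases ho with ho | ho
        · subst ho
          rw [if_pos rfl, ih (acc ++ ["M_io"]) "i" (Or.inl rfl)]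
          simp [hno]
        · subst ho
          rw [if_neg (by decide), if_pos rfl, ih (acc ++ ["M_oi"]) "o" (Or.inr rfl)]
          simp [hno]

-- ===== VERDICT (by name: the statement is the Claim_ definition above) =====
theorem labels_to_states_simple_v2_spec : Claim_equal_labels_to_states_simple_v2 := by
  intro labels _
  show labels_to_states_simple_v2 labels = labels_to_states_simple_v2_alt labels
  unfold labels_to_states_simple_v2 labels_to_states_simple_v2_alt pvOrients
  rw [pv_fold_eq labels [] "i" (Or.inl rfl)]
  simp
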